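-- pv_equiv track=rewrite | github.com/KAkhoa12/nexus-pms-service | app/utils/validators.py | password_strength_errors
-- ===== SOURCE A (Python) =====
-- COMMON_WEAK_PASSWORDS = {
--     "123456",
--     "12345678",
--     "password",
--     "password123",
--     "qwerty",
--     "admin",
--     "letmein",
-- }
--
-- def password_strength_errors(password: str) -> list[str]:
--     errors: list[str] = []
--     value = password or ""
--
--     if len(value) < 8:
--         errors.append("Password must be at least 8 characters")
--     if value.lower() in COMMON_WEAK_PASSWORDS:
--         errors.append("Password is too common")
--     if value and len(set(value)) == 1:
--         errors.append("Password cannot contain the same character only")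
--     if not any(char.islower() for char in value):
--         errors.append("Password must contain at least one lowercase letter")
--     if not any(char.isupper() for char in value):
--         errors.append("Password must contain at least one uppercase letter")
--     if not any(char.isdigit() for char in value):
--         errors.append("Password must contain at least one digit")
--     if not any(not char.isalnum() for char in value):
--         errors.append("Password must contain at least one special character")
--     if any(char.isspace() for char in value):
--         errors.append("Password cannot contain spaces")
--
--     return errors
-- ===== SOURCE B (Python) =====
-- COMMON_WEAK_PASSWORDS = {
--     "123456",
--     "12345678",
--     "password",
--     "password123",
--     "qwerty",
--     "admin",
--     "letmein",
-- }
--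
-- def password_strength_errors(password: str) -> list[str]:
--     value = password or ""
--
--     has_lower = has_upper = has_digit = has_special = has_space = False
--     first = None
--     any_diff = False
--     for char in value:
--         has_lower = has_lower or char.islower()
--         has_upper = has_upper or char.isupper()
--         has_digit = has_digit or char.isdigit()
--         has_special = has_special or not char.isalnum()
--         has_space = has_space or char.isspace()
--         if first is None:
--             first = char
--         elif char != first:
--             any_diff = True
--
--     errors: list[str] = []
--     if len(value) < 8:
--         errors.append("Password must be at least 8 characters")
--     if value.lower() in COMMON_WEAK_PASSWORDS:
--         errors.append("Password is too common")
--     if first is not None and not any_diff: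
--         errors.append("Password cannot contain the same character only")
--     if not has_lower:
--         errors.append("Password must contain at least one lowercase letter")
--     if not has_upper:
--         errors.append("Password must contain at least one uppercase letter")
--     if not has_digit:
--         errors.append("Password must contain at least one digit")
--     if not has_special:
--         errors.append("Password must contain at least one special character")
--     if has_space:
--         errors.append("Password cannot contain spaces")
--     return errors
-- ===== Notes on version B (the rewrite author's own statement) =====
-- stated objective: simpler
-- what changed: A scans the password seven separate times (set(), five any() generators, one more for spaces); B computes all character-class flags plus the first-character/any-difference facts in a single pass and then emits the same messages in the same order.
import Mathlib
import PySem

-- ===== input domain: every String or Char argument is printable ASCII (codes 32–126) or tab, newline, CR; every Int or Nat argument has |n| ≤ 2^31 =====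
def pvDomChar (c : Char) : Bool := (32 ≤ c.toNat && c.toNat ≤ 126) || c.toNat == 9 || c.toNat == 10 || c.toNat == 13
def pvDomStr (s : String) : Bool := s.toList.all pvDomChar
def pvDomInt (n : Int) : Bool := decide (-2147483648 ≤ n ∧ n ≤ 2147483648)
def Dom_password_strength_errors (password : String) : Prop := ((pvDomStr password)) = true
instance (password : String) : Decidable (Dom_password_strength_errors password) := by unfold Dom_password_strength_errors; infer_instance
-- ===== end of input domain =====

-- B replaces A's seven separate scans of the password with one pass that accumulates all
-- character-class flags (and the first character / any-difference flag); same messages, same order.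

-- module constant COMMON_WEAK_PASSWORDS (shared, as in the Python module)
def pvWeak : List String :=
  ["123456", "12345678", "password", "password123", "qwerty", "admin", "letmein"]

-- ===== PORT A =====
def password_strength_errors (password : String) : List String :=
  let value := password
  let cs := value.toList
  let errors : List String := []
  let errors := if cs.length < 8 then errors ++ ["Password must be at least 8 characters"] else errors
  let errors := if pvWeak.contains (PySem.Str.lower value) then errors ++ ["Password is too common"] else errors
  let errors := if !cs.isEmpty && (PySem.Set.ofList cs).length == 1 then errors ++ ["Password cannot contain the same character only"] else errors
  let errors := if !(cs.any PySem.Chars.islower) then errors ++ ["Password must contain at least one lowercase letter"] else errors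
  let errors := if !(cs.any PySem.Chars.isupper) then errors ++ ["Password must contain at least one uppercase letter"] else errors
  let errors := if !(cs.any PySem.Chars.isdigit) then errors ++ ["Password must contain at least one digit"] else errors
  let errors := if !(cs.any (fun c => !PySem.Chars.isalnum c)) then errors ++ ["Password must contain at least one special character"] else errors
  let errors := if cs.any PySem.Chars.isspace then errors ++ ["Password cannot contain spaces"] else errors
  errors

-- ===== PORT B =====
-- B's single loop over the characters, carrying
-- (has_lower, has_upper, has_digit, has_special, has_space, first, any_diff)
def pvScan : List Char → (Bool × Bool × Bool × Bool × Bool × Option Char × Bool) →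
    (Bool × Bool × Bool × Bool × Bool × Option Char × Bool)
  | [], st => st
  | c :: rest, (l, u, d, s, sp, first, ad) =>
    pvScan rest (l || PySem.Chars.islower c, u || PySem.Chars.isupper c,
      d || PySem.Chars.isdigit c, s || !PySem.Chars.isalnum c, sp || PySem.Chars.isspace c,
      match first with | none => some c | some c0 => some c0,
      match first with | none => ad | some c0 => ad || (c != c0))

def password_strength_errors_alt (password : String) : List String :=
  let value := password
  let (hl, hu, hd, hs, hsp, first, anyDiff) :=
    pvScan value.toList (false, false, false, false, false, none, false)
  let errors : List String := []
  let errors := if value.toList.length < 8 then errors ++ ["Password must be at least 8 characters"] else errors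
  let errors := if pvWeak.contains (PySem.Str.lower value) then errors ++ ["Password is too common"] else errors
  let errors := if first.isSome && !anyDiff then errors ++ ["Password cannot contain the same character only"] else errors
  let errors := if !hl then errors ++ ["Password must contain at least one lowercase letter"] else errors
  let errors := if !hu then errors ++ ["Password must contain at least one uppercase letter"] else errors
  let errors := if !hd then errors ++ ["Password must contain at least one digit"] else errors
  let errors := if !hs then errors ++ ["Password must contain at least one special character"] else errors
  let errors := if hsp then errors ++ ["Password cannot contain spaces"] else errors
  errors

-- ===== PRECONDITION & SPEC =====
def Spec_password_strength_errors (password : String) (out : List String) : Prop := out = password_strength_errors_alt password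
instance (password : String) (out : List String) : Decidable (Spec_password_strength_errors password out) := by unfold Spec_password_strength_errors; infer_instance

-- ===== CLAIM (what is proved, stated in full; the proofs are below) =====
def Claim_equal_password_strength_errors : Prop := ∀ (password : String), Dom_password_strength_errors password → Spec_password_strength_errors password (password_strength_errors password)

-- ===== LEMMAS AND PROOFS =====

lemma pvScan_some (cs : List Char) (l u d s sp ad : Bool) (c0 : Char) :
    pvScan cs (l, u, d, s, sp, some c0, ad) =
      (l || cs.any PySem.Chars.islower, u || cs.any PySem.Chars.isupper,
       d || cs.any PySem.Chars.isdigit, s || cs.any (fun c => !PySem.Chars.isalnum c),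
       sp || cs.any PySem.Chars.isspace, some c0, ad || cs.any (fun c => c != c0)) := by
  induction cs generalizing l u d s sp ad with
  | nil => simp [pvScan]
  | cons c rest ih => simp [pvScan, ih, Bool.or_assoc]

lemma pvScan_cons_none (c : Char) (rest : List Char) (l u d s sp ad : Bool) :
    pvScan (c :: rest) (l, u, d, s, sp, none, ad) =
      pvScan rest (l || PySem.Chars.islower c, u || PySem.Chars.isupper c,
        d || PySem.Chars.isdigit c, s || !PySem.Chars.isalnum c, sp || PySem.Chars.isspace c,
        some c, ad) := rfl

lemma foldl_add_const (rest : List Char) (c : Char) (h : ∀ x ∈ rest, x = c) :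
    List.foldl PySem.Set.add [c] rest = [c] := by
  induction rest with
  | nil => rfl
  | cons x xs ih =>
    have hx : x = c := h x (by simp)
    have : PySem.Set.add [c] x = [c] := by
      simp [PySem.Set.add, hx]
    simp only [List.foldl, this]
    exact ih fun y hy => h y (by simp [hy])

lemma ofList_len_one (c : Char) (rest : List Char) :
    ((PySem.Set.ofList (c :: rest)).length == 1) = !(rest.any (fun x => x != c)) := by
  by_cases h : ∀ x ∈ rest, x = c
  · have h1 : PySem.Set.ofList (c :: rest) = [c] := by
      have : PySem.Set.add PySem.Set.empty c = [c] := by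
        simp [PySem.Set.add, PySem.Set.empty, PySem.Set.contains]
      simpa [PySem.Set.ofList, List.foldl, this] using foldl_add_const rest c h
    simp [h1]
    intro x hx
    simpa using h x hx
  · push Not at h
    obtain ⟨x, hx, hxc⟩ := h
    have hmemx : x ∈ PySem.Set.ofList (c :: rest) := by
      rw [PySem.Set.mem_ofList]; simp [hx]
    have hmemc : c ∈ PySem.Set.ofList (c :: rest) := by
      rw [PySem.Set.mem_ofList]; simp
    have hne : (PySem.Set.ofList (c :: rest)).length ≠ 1 := by
      intro hlen
      obtain ⟨a, ha⟩ := List.length_eq_one_iff.mp hlen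
      rw [ha] at hmemx hmemc
      simp at hmemx hmemc
      exact hxc (hmemx.trans hmemc.symm)
    have hany : rest.any (fun x => x != c) = true := by
      simp only [List.any_eq_true, bne_iff_ne, ne_eq]
      exact ⟨x, hx, hxc⟩
    rw [hany]
    simp only [Bool.not_true]
    exact beq_eq_false_iff_ne.mpr hne

-- ===== VERDICT (by name: the statement is the Claim_ definition above) =====
theorem password_strength_errors_spec : Claim_equal_password_strength_errors := by
  intro password _
  unfold Spec_password_strength_errors password_strength_errors password_strength_errors_alt
  cases hcs : password.toList with
  | nil => simp [hcs, pvScan]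
  | cons c rest =>
    simp only [hcs, pvScan_cons_none, pvScan_some, Bool.false_or, Option.isSome_some,
      Bool.true_and, List.any_cons, List.isEmpty_cons, Bool.not_false, ofList_len_one]
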